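-- pv_equiv track=rewrite | github.com/i3kae/Algorithm | 백준/Bronze/23808. 골뱅이 찍기 － ㅂ/골뱅이 찍기 － ㅂ.py | f
-- ===== SOURCE A (Python) =====
-- def f(N):
--     result = ['' for _ in range(N * 5)]
--
--     for idx in range(N*5):
--         if 2 * N - 1  < idx < 2 * N + N or idx >= N * 5 - N:
--             result[idx] = "@" * (N * 5)
--         else:
--             result[idx] = f"{'@' * N}{' ' * (N * 5 - N * 2)}{'@' * N}"
--
--     return "\n".join(result)
-- ===== SOURCE B (Python) =====
-- def f(N):
--     full = "@" * (5 * N)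
--     border = "@" * N + " " * (5 * N - 2 * N) + "@" * N
--     rows = [border] * (2 * N) + [full] * N + [border] * N + [full] * N
--     return "\n".join(rows)
-- ===== Notes on version B (the rewrite author's own statement) =====
-- stated objective: simpler
-- what changed: B precomputes the two distinct row strings once and assembles the grid as four contiguous replicated segments concatenated by counts, instead of A's per-index loop that tests a compound condition and rebuilds the row string at every one of the 5N indices.
import Mathlib
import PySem

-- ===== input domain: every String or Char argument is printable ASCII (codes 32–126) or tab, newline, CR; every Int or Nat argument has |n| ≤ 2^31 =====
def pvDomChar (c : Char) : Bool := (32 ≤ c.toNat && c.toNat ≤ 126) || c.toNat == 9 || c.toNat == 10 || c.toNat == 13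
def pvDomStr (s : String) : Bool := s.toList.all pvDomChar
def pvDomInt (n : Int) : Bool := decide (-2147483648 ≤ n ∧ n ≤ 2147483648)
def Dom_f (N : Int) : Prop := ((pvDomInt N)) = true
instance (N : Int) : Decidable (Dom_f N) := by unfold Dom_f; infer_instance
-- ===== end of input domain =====

-- B precomputes the two distinct row strings and assembles the grid as four replicated
-- segments concatenated by counts, instead of A's per-index branching loop; objective: simpler.

-- ===== PORT A =====
def f (N : Int) : String :=
  let result := (PySem.List.pyRange 0 (N * 5) 1).map (fun _ => "")
  let result := (PySem.List.pyRange 0 (N * 5) 1).foldl (fun res idx =>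
    if 2 * N - 1 < idx ∧ idx < 2 * N + N ∨ idx ≥ N * 5 - N then
      res.set idx.toNat (String.ofList (PySem.List.pyRepeat ['@'] (N * 5)))
    else
      res.set idx.toNat (String.ofList
        (PySem.List.pyRepeat ['@'] N ++ PySem.List.pyRepeat [' '] (N * 5 - N * 2)
          ++ PySem.List.pyRepeat ['@'] N))) result
  PySem.Str.join "\n" result

-- ===== PORT B =====
def f_alt (N : Int) : String :=
  let full := String.ofList (PySem.List.pyRepeat ['@'] (5 * N))
  let border := String.ofList
    (PySem.List.pyRepeat ['@'] N ++ PySem.List.pyRepeat [' '] (5 * N - 2 * N)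
      ++ PySem.List.pyRepeat ['@'] N)
  let rows := List.replicate (2 * N).toNat border ++ List.replicate N.toNat full
      ++ List.replicate N.toNat border ++ List.replicate N.toNat full
  PySem.Str.join "\n" rows

-- ===== PRECONDITION & SPEC =====
def Spec_f (N : Int) (out : String) : Prop := out = f_alt N
instance (N : Int) (out : String) : Decidable (Spec_f N out) := by unfold Spec_f; infer_instance

-- ===== CLAIM (what is proved, stated in full; the proofs are below) =====
def Claim_equal_f : Prop := ∀ (N : Int), Dom_f N → Spec_f N (f N)

-- ===== LEMMAS AND PROOFS =====

-- abbreviations for the two row strings (used only by the proofs)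
def fullS (N : Int) : String := String.ofList (PySem.List.pyRepeat ['@'] (5 * N))
def borderS (N : Int) : String := String.ofList
    (PySem.List.pyRepeat ['@'] N ++ PySem.List.pyRepeat [' '] (5 * N - 2 * N)
      ++ PySem.List.pyRepeat ['@'] N)

-- A's fill loop: setting index i to h i for each i in [a, b) rewrites each position once.
theorem foldl_set_eq_mapIdx {α : Type} (h : Int → α) (b : Int) :
    ∀ (a : Int) (res : List α), 0 ≤ a → b ≤ (res.length : Int) →
    (PySem.List.pyRange a b 1).foldl (fun r i => r.set i.toNat (h i)) res
      = res.mapIdx (fun j x => if a ≤ (j : Int) ∧ (j : Int) < b then h j else x) := by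
  have key : ∀ (n : Nat) (a : Int) (res : List α), 0 ≤ a → b ≤ (res.length : Int) →
      (b - a).toNat = n →
      (PySem.List.pyRange a b 1).foldl (fun r i => r.set i.toNat (h i)) res
        = res.mapIdx (fun j x => if a ≤ (j : Int) ∧ (j : Int) < b then h j else x) := by
    intro n
    induction n with
    | zero =>
      intro a res ha hb hn
      rw [PySem.List.pyRange_one_eq_nil (by omega)]
      simp only [List.foldl_nil]
      apply List.ext_getElem (by simp)
      intro j hj _
      simp only [List.getElem_mapIdx]
      have : ¬ (a ≤ (j : Int) ∧ (j : Int) < b) := by omega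
      simp [this]
    | succ n ih =>
      intro a res ha hb hn
      rw [PySem.List.pyRange_one_cons (by omega)]
      simp only [List.foldl_cons]
      rw [ih (a + 1) _ (by omega) (by simp; omega) (by omega)]
      apply List.ext_getElem (by simp)
      intro j hj hj'
      simp only [List.getElem_mapIdx, List.getElem_set]
      split_ifs
      all_goals (try rfl)
      all_goals (congr 1; omega)
  intro a res ha hb; exact key (b - a).toNat a res ha hb rfl

theorem f_spec : Claim_equal_f := by
  intro N _
  unfold Spec_f f f_alt
  have h51 : N * 5 = 5 * N := by ring
  have h32 : 5 * N - N * 2 = 5 * N - 2 * N := by ring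
  simp only []
  rw [h51, h32]
  rw [show String.ofList (PySem.List.pyRepeat ['@'] (5 * N)) = fullS N from rfl]
  rw [show String.ofList (PySem.List.pyRepeat ['@'] N
        ++ PySem.List.pyRepeat [' '] (5 * N - 2 * N)
        ++ PySem.List.pyRepeat ['@'] N) = borderS N from rfl]
  have hfun : (fun (res : List String) (idx : Int) =>
      if 2 * N - 1 < idx ∧ idx < 2 * N + N ∨ idx ≥ 5 * N - N then
        res.set idx.toNat (fullS N) else res.set idx.toNat (borderS N))
      = (fun res idx => res.set idx.toNat
          (if 2 * N - 1 < idx ∧ idx < 2 * N + N ∨ idx ≥ 5 * N - N then fullS N else borderS N)) := by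
    funext res idx; split <;> rfl
  rw [hfun]
  rw [foldl_set_eq_mapIdx
      (fun i => if 2 * N - 1 < i ∧ i < 2 * N + N ∨ i ≥ 5 * N - N then fullS N else borderS N)
      (5 * N) 0 _ le_rfl (by simp [PySem.List.length_pyRange_one])]
  congr 1
  apply List.ext_getElem
  · simp [PySem.List.length_pyRange_one]; omega
  · intro j hj hj'
    simp only [List.length_mapIdx, List.length_map, PySem.List.length_pyRange_one] at hj
    simp only [List.length_append, List.length_replicate] at hj'
    simp only [List.getElem_mapIdx, List.getElem_map]
    rw [if_pos (by constructor <;> omega)]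
    simp only [List.getElem_append, List.length_append, List.length_replicate,
      List.getElem_replicate]
    split_ifs
    all_goals (try rfl)
    all_goals (exfalso; omega)
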